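-- pv_equiv track=rewrite | github.com/ssfaruqu/codedocproj | testing/code_tests/func11/func11_psuedo_tests.py | func11
-- ===== SOURCE A (Python) =====
-- import math # pragma: no cover
--
-- def func11(grid, reverse):
--     def process_row(row):
--         if len(row) == 1:
--             return [row[0], row[0]]
--         elif len(row) == 2:
--             return [row[1], row[0]]
--         elif len(row) == 0:
--             return row
--
--         mid = math.floor(len(row)/2)
--         lower = row[0:mid]
--         upper = row[mid:]
--
--         ret = process_row(lower) + process_row(upper)
--
--         return ret
--
--     for i in range(len(grid)):
--         grid[i] = process_row(grid[i])
--
--         if reverse: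
--             low = 0
--             high = len(grid[i]) - 1
--             while low < high:
--                 temp = grid[i][low]
--                 grid[i][low] = grid[i][high]
--                 grid[i][high] = temp
--                 low += 1
--                 high -= 1
--
--     return grid
-- ===== SOURCE B (Python) =====
-- def func11(grid, reverse):
--     # Iterative: explicit segment stack emits leaves left-to-right into one flat
--     # list (no recursive concatenation); optional reverse done by slicing.
--     # Mutates grid in place (grid[i] = ...) and returns it, like the original.
--     for i in range(len(grid)):
--         out = []
--         stack = [grid[i]]
--         while stack:
--             seg = stack.pop()
--             n = len(seg)
--             if n == 0:
--                 continue
--             elif n == 1: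
--                 out.append(seg[0])
--                 out.append(seg[0])
--             elif n == 2:
--                 out.append(seg[1])
--                 out.append(seg[0])
--             else:
--                 mid = n // 2
--                 stack.append(seg[mid:])
--                 stack.append(seg[:mid])
--         grid[i] = out[::-1] if reverse else out
--     return grid
-- ===== Notes on version B (the rewrite author's own statement) =====
-- stated objective: alternative
-- what changed: Replaces the recursive half-split with list-concatenation per row (and the in-place two-pointer reversal loop) by a single iterative explicit-stack traversal that appends each leaf's one or two elements to one flat output list, reversing by a slice.
import Mathlib
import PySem

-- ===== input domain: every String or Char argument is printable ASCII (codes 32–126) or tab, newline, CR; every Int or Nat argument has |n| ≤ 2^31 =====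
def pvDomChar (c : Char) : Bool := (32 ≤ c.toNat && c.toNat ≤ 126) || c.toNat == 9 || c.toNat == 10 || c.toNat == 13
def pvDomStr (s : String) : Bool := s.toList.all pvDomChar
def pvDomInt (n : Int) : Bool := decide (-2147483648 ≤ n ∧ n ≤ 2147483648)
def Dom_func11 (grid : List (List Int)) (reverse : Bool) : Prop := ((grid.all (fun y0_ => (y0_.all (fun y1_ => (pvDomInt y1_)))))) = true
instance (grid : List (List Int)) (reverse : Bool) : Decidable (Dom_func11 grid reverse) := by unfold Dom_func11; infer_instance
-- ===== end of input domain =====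

-- B replaces A's recursive half-split concatenation per row (and A's in-place two-pointer
-- reversal loop) by one iterative explicit-stack leaf traversal appending to a flat list.
-- A reassigns grid[i] in place and returns grid; the equivalence proved is about the return value.
-- Recursions/loops are ported structurally on an explicit fuel argument (a totality guard only;
-- the fuel is always sufficient, so every Python step is taken literally).

-- ===== PORT A =====
-- process_row: recursive half-split; math.floor(len(row)/2) is exactly len/2 (Nat division) here;
-- fuel = row length bounds the recursion depth (each recursive argument is strictly shorter)
def processRowF : Nat → List Int → List Int
  | 0, row => row
  | fuel + 1, row =>
    if row.length = 1 then
      [PySem.List.pyGetD row 0 0, PySem.List.pyGetD row 0 0]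
    else if row.length = 2 then
      [PySem.List.pyGetD row 1 0, PySem.List.pyGetD row 0 0]
    else if row.length = 0 then
      row
    else
      processRowF fuel (PySem.List.slice row (some 0) (some ((row.length / 2 : Nat) : Int))) ++
        processRowF fuel (PySem.List.slice row (some ((row.length / 2 : Nat) : Int)) none)

def processRow (row : List Int) : List Int := processRowF row.length row

-- the in-place while-loop swap (temp variable inlined into the two writes);
-- fuel = high - low bounds the number of iterations
def swapLoopF : Nat → List Int → Int → Int → List Int
  | 0, xs, _, _ => xs
  | fuel + 1, xs, low, high =>
    if low < high then
      swapLoopF fuel ((xs.set low.toNat (PySem.List.pyGetD xs high 0)).set high.toNat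
        (PySem.List.pyGetD xs low 0)) (low + 1) (high - 1)
    else xs

def swapLoop (xs : List Int) (low high : Int) : List Int :=
  swapLoopF (high - low).toNat xs low high

def func11 (grid : List (List Int)) (reverse : Bool) : List (List Int) :=
  (PySem.List.pyRange 0 grid.length 1).foldl
    (fun g i =>
      let p := processRow (PySem.List.pyGetD g i [])
      let p := if reverse then swapLoop p 0 ((p.length : Int) - 1) else p
      g.set i.toNat p)
    grid

-- ===== PORT B =====
-- explicit stack (head = top of Python's list-stack), flat accumulator, leaf order;
-- fuel = (sum of 2^len over the stack) + stack size bounds the number of loop iterations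
def leafLoopF : Nat → List (List Int) → List Int → List Int
  | 0, _, out => out
  | fuel + 1, stack, out =>
    match stack with
    | [] => out
    | seg :: rest =>
      match seg with
      | [] => leafLoopF fuel rest out
      | [a] => leafLoopF fuel rest (out ++ [a, a])
      | [a, b] => leafLoopF fuel rest (out ++ [b, a])
      | a :: b :: c :: tl =>
        leafLoopF fuel ((a :: b :: c :: tl).take ((a :: b :: c :: tl).length / 2) ::
          (a :: b :: c :: tl).drop ((a :: b :: c :: tl).length / 2) :: rest) out

def leafLoop (stack : List (List Int)) (out : List Int) : List Int :=
  leafLoopF ((stack.map fun s => 2 ^ s.length).sum + stack.length) stack out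

def func11_alt (grid : List (List Int)) (reverse : Bool) : List (List Int) :=
  grid.map (fun row =>
    let out := leafLoop [row] []
    if reverse then out.reverse else out)

-- ===== PRECONDITION & SPEC =====
def Spec_func11 (grid : List (List Int)) (reverse : Bool) (out : List (List Int)) : Prop := out = func11_alt grid reverse
instance (grid : List (List Int)) (reverse : Bool) (out : List (List Int)) : Decidable (Spec_func11 grid reverse out) := by unfold Spec_func11; infer_instance

-- ===== CLAIM (what is proved, stated in full; the proofs are below) =====
def Claim_equal_func11 : Prop := ∀ (grid : List (List Int)) (reverse : Bool), Dom_func11 grid reverse → Spec_func11 grid reverse (func11 grid reverse)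

-- ===== LEMMAS AND PROOFS =====

-- the fuel is irrelevant as long as it is sufficient
theorem processRowF_irrel : ∀ (fuel fuel' : Nat) (row : List Int), row.length ≤ fuel →
    row.length ≤ fuel' → processRowF fuel row = processRowF fuel' row := by
  intro fuel
  induction fuel with
  | zero =>
    intro fuel' row h h'
    have hnil : row = [] := List.eq_nil_of_length_eq_zero (by omega)
    subst hnil
    cases fuel' <;> simp [processRowF]
  | succ f ih =>
    intro fuel' row h h'
    cases fuel' with
    | zero =>
      have hnil : row = [] := List.eq_nil_of_length_eq_zero (by omega)
      subst hnil
      simp [processRowF]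
    | succ f' =>
      simp only [processRowF]
      split_ifs with h1 h2 h3
      · rfl
      · rfl
      · rfl
      · have hsl : (PySem.List.slice row (some 0)
            (some ((row.length / 2 : Nat) : Int))).length = row.length / 2 := by
          rw [PySem.List.slice_zero_start, PySem.List.slice_to_natCast]
          simp [Nat.min_eq_left (Nat.div_le_self _ _)]
        have hsu : (PySem.List.slice row (some ((row.length / 2 : Nat) : Int))
            none).length = row.length - row.length / 2 := by
          rw [PySem.List.slice_from_natCast]; simp
        rw [ih f' _ (by omega) (by omega), ih f' _ (by omega) (by omega)]

theorem processRow_nil : processRow [] = [] := rfl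

theorem processRow_one (a : Int) : processRow [a] = [a, a] := by
  norm_num [processRow, processRowF, pysem]

theorem processRow_two (a b : Int) : processRow [a, b] = [b, a] := by
  norm_num [processRow, processRowF, pysem]

theorem processRowF_succ_big (f : Nat) (row : List Int) (h3 : 3 ≤ row.length) :
    processRowF (f + 1) row =
      processRowF f (PySem.List.slice row (some 0) (some ((row.length / 2 : Nat) : Int))) ++
        processRowF f (PySem.List.slice row (some ((row.length / 2 : Nat) : Int)) none) := by
  simp only [processRowF]
  rw [if_neg (by omega), if_neg (by omega), if_neg (by omega)]

theorem processRow_eq_big (row : List Int) (h3 : 3 ≤ row.length) :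
    processRow row = processRow (row.take (row.length / 2)) ++
      processRow (row.drop (row.length / 2)) := by
  have hsl : PySem.List.slice row (some 0) (some ((row.length / 2 : Nat) : Int)) =
      row.take (row.length / 2) := by
    rw [PySem.List.slice_zero_start, PySem.List.slice_to_natCast]
  have hsu : PySem.List.slice row (some ((row.length / 2 : Nat) : Int)) none =
      row.drop (row.length / 2) := by
    rw [PySem.List.slice_from_natCast]
  have e : row.length = (row.length - 1) + 1 := by omega
  unfold processRow
  conv_lhs => rw [e]
  rw [processRowF_succ_big _ _ h3, hsl, hsu]
  have htk : (row.take (row.length / 2)).length = row.length / 2 := by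
    simp [Nat.min_eq_left (Nat.div_le_self _ _)]
  have hdr : (row.drop (row.length / 2)).length = row.length - row.length / 2 := by simp
  rw [processRowF_irrel (row.length - 1) (row.take (row.length / 2)).length _
        (by rw [htk]; omega) le_rfl,
      processRowF_irrel (row.length - 1) (row.drop (row.length / 2)).length _
        (by rw [hdr]; omega) le_rfl]

theorem two_pow_split (n : ℕ) (h3 : 3 ≤ n) : 2 ^ (n / 2) + 2 ^ (n - n / 2) + 2 ≤ 2 ^ n := by
  have h1 : (2:ℕ) ^ (n / 2) ≤ 2 ^ (n - 2) := Nat.pow_le_pow_right (by omega) (by omega)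
  have h2 : (2:ℕ) ^ (n - n / 2) ≤ 2 ^ (n - 1) := Nat.pow_le_pow_right (by omega) (by omega)
  have hp : (2:ℕ) ≤ 2 ^ (n - 2) := by
    calc (2:ℕ) = 2 ^ 1 := rfl
      _ ≤ 2 ^ (n - 2) := Nat.pow_le_pow_right (by omega) (by omega)
  have e1 : (2:ℕ) ^ (n - 1) = 2 ^ (n - 2) * 2 := by
    rw [← pow_succ]; congr 1; omega
  have e2 : (2:ℕ) ^ n = 2 ^ (n - 2) * 4 := by
    have hn : n - 2 + 2 = n := by omega
    calc (2:ℕ) ^ n = 2 ^ (n - 2 + 2) := by rw [hn]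
      _ = 2 ^ (n - 2) * 4 := by rw [pow_add]; norm_num
  omega

-- B's stack loop flattens processRow over the stacked segments
theorem leafLoopF_eq : ∀ (f : Nat) (stack : List (List Int)) (out : List Int),
    (stack.map fun s => 2 ^ s.length).sum + stack.length ≤ f →
    leafLoopF f stack out = out ++ (stack.map processRow).flatten := by
  intro f
  induction f with
  | zero =>
    intro stack out h
    cases stack with
    | nil => simp [leafLoopF]
    | cons seg rest => simp only [List.length_cons] at h; omega
  | succ f ih =>
    intro stack out h
    cases stack with
    | nil => simp [leafLoopF]
    | cons seg rest =>
      rcases seg with _ | ⟨a, _ | ⟨b, _ | ⟨c, tl⟩⟩⟩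
      · simp only [leafLoopF]
        rw [ih rest out (by simp at h; omega)]
        simp [processRow_nil]
      · simp only [leafLoopF]
        rw [ih rest (out ++ [a, a]) (by simp at h; omega)]
        simp [processRow_one]
      · simp only [leafLoopF]
        rw [ih rest (out ++ [b, a]) (by simp at h; omega)]
        simp [processRow_two]
      · simp only [leafLoopF]
        have hmeas : ((((a :: b :: c :: tl).take ((a :: b :: c :: tl).length / 2) ::
              (a :: b :: c :: tl).drop ((a :: b :: c :: tl).length / 2) :: rest).map
              (fun s => 2 ^ s.length)).sum +
            ((a :: b :: c :: tl).take ((a :: b :: c :: tl).length / 2) ::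
              (a :: b :: c :: tl).drop ((a :: b :: c :: tl).length / 2) :: rest).length) ≤ f := by
          simp only [List.map_cons, List.sum_cons, List.length_cons, List.length_take,
            List.length_drop] at h ⊢
          rw [show tl.length + 1 + 1 + 1 = tl.length + 3 from by omega] at h ⊢
          rw [Nat.min_eq_left (Nat.div_le_self _ _)]
          have hpow := two_pow_split (tl.length + 3) (by omega)
          omega
        rw [ih _ out hmeas]
        simp only [List.map_cons, List.flatten_cons]
        rw [processRow_eq_big (a :: b :: c :: tl) (by simp only [List.length_cons]; omega)]
        simp only [List.append_assoc]

theorem leafLoop_eq (stack : List (List Int)) (out : List Int) :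
    leafLoop stack out = out ++ (stack.map processRow).flatten :=
  leafLoopF_eq _ stack out le_rfl

-- A's index loop 'grid[i] = f(grid[i])' done with foldl/set is map, from index k on
theorem foldl_set_eq_map (f : List Int → List Int) : ∀ (n k : Nat) (g : List (List Int)),
    g.length - k = n →
    (PySem.List.pyRange (k : Int) (g.length : Int) 1).foldl
      (fun h i => h.set i.toNat (f (PySem.List.pyGetD h i []))) g
    = g.take k ++ (g.drop k).map f := by
  intro n
  induction n with
  | zero =>
    intro k g h
    have hk : g.length ≤ k := by omega
    rw [PySem.List.pyRange_one_eq_nil (by exact_mod_cast hk)]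
    simp [List.take_of_length_le hk, List.drop_eq_nil_of_le hk]
  | succ n ih =>
    intro k g h
    have hk : k < g.length := by omega
    rw [PySem.List.pyRange_one_cons (by exact_mod_cast hk), List.foldl_cons]
    have hget : PySem.List.pyGetD g (k : Int) [] = g[k] := by
      rw [PySem.List.pyGetD_natCast]; exact List.getD_eq_getElem g [] hk
    have hcast : ((k : Int) + 1) = ((k + 1 : Nat) : Int) := by push_cast; ring
    have hlen : (g.set k (f g[k])).length = g.length := by simp
    rw [hget, Int.toNat_natCast, hcast, show ((g.length : Int)) = (((g.set k (f g[k])).length : Int)) by rw [hlen]]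
    rw [ih (k + 1) (g.set k (f g[k])) (by simp; omega)]
    have hset : g.set k (f g[k]) = (g.take k ++ [f g[k]]) ++ g.drop (k + 1) := by
      rw [List.set_eq_take_cons_drop _ hk]; simp
    have hlen1 : (g.take k ++ [f g[k]]).length = k + 1 := by
      simp [Nat.min_eq_left (le_of_lt hk)]
    rw [hset, List.take_left' hlen1, List.drop_left' hlen1]
    rw [List.drop_eq_getElem_cons hk, List.map_cons]
    simp

theorem swapLoopF_length : ∀ (f : Nat) (xs : List Int) (low high : Int),
    (swapLoopF f xs low high).length = xs.length := by
  intro f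
  induction f with
  | zero => intro xs low high; simp [swapLoopF]
  | succ f ih =>
    intro xs low high
    simp only [swapLoopF]
    split_ifs with h
    · rw [ih]; simp
    · rfl

theorem swapLoopF_getElem? : ∀ (f : Nat) (xs : List Int) (low high : Int),
    (high - low).toNat ≤ f → 0 ≤ low → high < (xs.length : Int) →
    ∀ (j : Nat), j < xs.length →
    (swapLoopF f xs low high)[j]? =
      if low ≤ (j : Int) ∧ (j : Int) ≤ high then xs[(low + high - j).toNat]? else xs[j]? := by
  intro f
  induction f with
  | zero =>
    intro xs low high hf h0 hh j hj
    simp only [swapLoopF]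
    by_cases hc : low ≤ (j : Int) ∧ (j : Int) ≤ high
    · rw [if_pos hc]
      have : (low + high - j).toNat = j := by omega
      rw [this]
    · rw [if_neg hc]
  | succ f ih =>
    intro xs low high hf h0 hh j hj
    simp only [swapLoopF]
    by_cases h : low < high
    · rw [if_pos h]
      have hlt : low.toNat < xs.length := by omega
      have hht : high.toNat < xs.length := by omega
      have hv : PySem.List.pyGetD xs high 0 = xs[high.toNat] := by
        rw [PySem.List.pyGetD_eq_getElem] <;> omega
      have hw : PySem.List.pyGetD xs low 0 = xs[low.toNat] := by
        rw [PySem.List.pyGetD_eq_getElem] <;> omega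
      set ys := (xs.set low.toNat (PySem.List.pyGetD xs high 0)).set high.toNat
        (PySem.List.pyGetD xs low 0) with hys_def
      have hys_len : ys.length = xs.length := by simp [hys_def]
      rw [ih ys (low + 1) (high - 1) (by omega) (by omega) (by omega) j (by omega)]
      have hys : ∀ (m : Nat), m < xs.length →
          ys[m]? = if m = low.toNat then some xs[high.toNat]
            else if m = high.toNat then some xs[low.toNat] else xs[m]? := by
        intro m hm
        rw [hys_def]
        by_cases h1 : m = low.toNat
        · subst h1
          rw [List.getElem?_set_ne (by omega), List.getElem?_set_self (by omega),
            if_pos rfl, hv]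
        · by_cases h2 : m = high.toNat
          · subst h2
            rw [List.getElem?_set_self (by simp; omega), if_neg (by omega), if_pos rfl, hw]
          · rw [List.getElem?_set_ne (by omega), List.getElem?_set_ne (by omega),
              if_neg h1, if_neg h2]
      by_cases hc : low ≤ (j : Int) ∧ (j : Int) ≤ high
      · rw [if_pos hc]
        by_cases hc2 : low + 1 ≤ (j : Int) ∧ (j : Int) ≤ high - 1
        · rw [if_pos hc2]
          have hidx : (low + 1 + (high - 1) - j).toNat = (low + high - j).toNat := by omega
          rw [hidx, hys (low + high - j).toNat (by omega)]
          rw [if_neg (by omega), if_neg (by omega)]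
        · rw [if_neg hc2, hys j hj]
          by_cases hjl : (j : Int) = low
          · rw [if_pos (by omega)]
            have : (low + high - j).toNat = high.toNat := by omega
            rw [this, List.getElem?_eq_getElem hht]
          · have hjh : (j : Int) = high := by omega
            rw [if_neg (by omega), if_pos (by omega)]
            have : (low + high - j).toNat = low.toNat := by omega
            rw [this, List.getElem?_eq_getElem hlt]
      · rw [if_neg hc]
        by_cases hc2 : low + 1 ≤ (j : Int) ∧ (j : Int) ≤ high - 1
        · omega
        · rw [if_neg hc2, hys j hj, if_neg (by omega), if_neg (by omega)]
    · rw [if_neg h]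
      by_cases hc : low ≤ (j : Int) ∧ (j : Int) ≤ high
      · rw [if_pos hc]
        have : (low + high - j).toNat = j := by omega
        rw [this]
      · rw [if_neg hc]

theorem swapLoop_reverse (xs : List Int) :
    swapLoop xs 0 ((xs.length : Int) - 1) = xs.reverse := by
  unfold swapLoop
  apply List.ext_getElem?
  intro j
  by_cases hj : j < xs.length
  · rw [swapLoopF_getElem? ((xs.length : Int) - 1 - 0).toNat xs 0 ((xs.length : Int) - 1)
      le_rfl (by omega) (by omega) j hj]
    rw [if_pos (by omega)]
    have hidx : ((0 : Int) + ((xs.length : Int) - 1) - j).toNat = xs.length - 1 - j := by omega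
    rw [hidx, List.getElem?_eq_getElem (by omega), List.getElem?_eq_getElem
      (by simpa using hj), List.getElem_reverse]
  · have h1 : xs.reverse.length ≤ j := by simpa using Nat.le_of_not_lt hj
    have h2 : (swapLoopF ((xs.length : Int) - 1 - 0).toNat xs 0 ((xs.length : Int) - 1)).length ≤ j := by
      rw [swapLoopF_length]; omega
    rw [List.getElem?_eq_none h2, List.getElem?_eq_none h1]

-- ===== VERDICT (by name: the statement is the Claim_ definition above) =====
theorem func11_spec : Claim_equal_func11 := by
  intro grid reverse _
  unfold Spec_func11 func11 func11_alt
  have hb := foldl_set_eq_map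
    (fun row =>
      let p := processRow row
      if reverse then swapLoop p 0 ((p.length : Int) - 1) else p)
    (grid.length - 0) 0 grid rfl
  simp only [List.take_zero, List.drop_zero, List.nil_append] at hb
  refine Eq.trans ?_ (hb.trans ?_)
  · rfl
  · refine List.map_congr_left (fun row _ => ?_)
    have hrow : leafLoop [row] [] = processRow row := by
      rw [leafLoop_eq]; simp
    cases reverse <;> simp [hrow, swapLoop_reverse]
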